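-- pv_equiv track=rewrite | github.com/ouharu/code-practice | paiza/A_level/A034.py | solve
-- ===== SOURCE A (Python) =====
-- def solve(N, X, prices):
--     # 初始化一维DP数组
--     dp = [-1] * (X + 1)
--     dp[0] = 0  # 基础情况：不选择任何物品，总价值为0
--
--     for i in range(N):
--         # 从后向前更新，避免覆盖还需要使用的数据
--         for j in range(X, prices[i] - 1, -1):
--             if dp[j - prices[i]] != -1:
--                 dp[j] = max(dp[j], dp[j - prices[i]] + 1)
--
--     # 找到最大物品数
--     max_items = max(dp)
--
--     # 在最大物品数的情况下，找到最大总价值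
--     max_value = 0
--     for j in range(X, -1, -1):
--         if dp[j] == max_items:
--             max_value = j
--             break
--
--     return X - max_value
-- ===== SOURCE B (Python) =====
-- def solve(N, X, prices):
--     # Breadth-first over reachable (count, total) pairs instead of a budget-indexed DP array.
--     reach = {(0, 0)}
--     for p in (prices[:N] if N > 0 else []):
--         reach |= {(c + 1, s + p) for c, s in reach if s + p <= X}
--     k = max(c for c, s in reach)
--     return X - max(s for c, s in reach if c == k)
-- ===== Notes on version B (the rewrite author's own statement) =====
-- stated objective: alternative
-- what changed: Replaces the budget-indexed DP array (size X+1, scanned backwards per item, then a max and a top-down scan) by a breadth-first set of reachable (count, total) pairs built item by item, from which the answer is read off as the best total among maximum-count pairs.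
import Mathlib
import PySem

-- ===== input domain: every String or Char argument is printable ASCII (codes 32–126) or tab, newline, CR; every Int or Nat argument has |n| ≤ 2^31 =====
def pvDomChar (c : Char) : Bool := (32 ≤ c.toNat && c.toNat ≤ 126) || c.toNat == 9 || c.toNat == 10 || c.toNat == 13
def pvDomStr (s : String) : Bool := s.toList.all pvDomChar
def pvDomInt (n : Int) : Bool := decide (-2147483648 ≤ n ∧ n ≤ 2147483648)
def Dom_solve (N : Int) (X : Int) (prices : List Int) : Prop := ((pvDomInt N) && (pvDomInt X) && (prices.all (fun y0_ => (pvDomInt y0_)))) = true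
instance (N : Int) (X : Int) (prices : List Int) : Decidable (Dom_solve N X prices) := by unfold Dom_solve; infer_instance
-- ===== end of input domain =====

-- B replaces A's budget-indexed DP array by a breadth-first set of reachable (count, total)
-- pairs; same return value on all inputs where A returns (alternative algorithm, not faster).

-- ===== PORT A =====
-- Python's dp is a list with O(1) indexing: ported as Array Int. Inside Pre_ every index
-- is nonnegative and in range, so .toNat / the getD default / setIfInBounds are never hit.
-- body of A's inner 'for j in range(X, prices[i]-1, -1)' loop
def bodyA (p : Int) (dp : Array Int) (j : Int) : Array Int :=
  if dp.getD (j - p).toNat (-1) ≠ -1 then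
    dp.setIfInBounds j.toNat (max (dp.getD j.toNat (-1)) (dp.getD (j - p).toNat (-1) + 1))
  else dp

-- one iteration of A's outer loop (the whole inner loop for one price p); for p < 0 Python
-- raises IndexError at the first j (outside Pre_): the range stop is clamped to -1 so the
-- port stays total and cheap there (for 0 ≤ p the clamp is the identity)
def stepA (X : Int) (dp : Array Int) (p : Int) : Array Int :=
  (PySem.List.pyRange X (max (p - 1) (-1)) (-1)).foldl (bodyA p) dp

def solve (N : Int) (X : Int) (prices : List Int) : Int :=
  -- dp = [-1] * (X + 1); dp[0] = 0
  let dp0 : Array Int := (Array.replicate (X + 1).toNat (-1)).setIfInBounds 0 0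
  -- for i in range(N): ... ; Python raises IndexError at i = len(prices) when N > len
  -- (outside Pre_): the loop is capped there so the port stays total and cheap
  let dp := (PySem.List.pyRange 0 (min N (prices.length : Int)) 1).foldl
      (fun dp i => stepA X dp (PySem.List.pyGetD prices i 0)) dp0
  -- max_items = max(dp)
  let maxItems := (PySem.List.max? dp.toList (fun y => y)).getD 0
  -- max_value = 0; for j in range(X, -1, -1): if dp[j] == max_items: max_value = j; break
  let maxValue := ((PySem.List.pyRange X (-1) (-1)).foldl (fun acc j =>
      match acc with
      | some v => some v
      | none => if dp.getD j.toNat (-1) = maxItems then some j else none)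
      (none : Option Int)).getD 0
  X - maxValue

-- ===== PORT B =====
-- one iteration of B's loop: reach |= {(c+1, s+p) for c, s in reach if s+p <= X}
def stepB (X : Int) (reach : List (Int × Int)) (p : Int) : List (Int × Int) :=
  PySem.Set.union reach ((reach.filter (fun q => decide (q.2 + p ≤ X))).map (fun q => (q.1 + 1, q.2 + p)))

def solve_alt (N : Int) (X : Int) (prices : List Int) : Int :=
  -- reach = {(0, 0)}
  -- for p in (prices[:N] if N > 0 else []): reach |= {...}
  let items := if 0 < N then PySem.List.slice prices (some 0) (some N) else []
  let reach := items.foldl (stepB X) (PySem.Set.ofList [((0 : Int), (0 : Int))])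
  -- k = max(c for c, s in reach)
  let k := (PySem.List.max? (reach.map (fun q => q.1)) (fun y => y)).getD 0
  -- return X - max(s for c, s in reach if c == k)
  X - ((PySem.List.max? ((reach.filter (fun q => decide (q.1 = k))).map (fun q => q.2)) (fun y => y)).getD 0)

-- ===== PRECONDITION & SPEC =====
-- Pre_solve excludes exactly the inputs where Python A raises: X < 0 (dp[0] = 0 on an empty
-- list), N > len(prices) (prices[i]), and a negative price among the first N (dp[j - p]
-- indexed past the end); A returns normally on everything else.
def Pre_solve (N : Int) (X : Int) (prices : List Int) : Prop :=
  0 ≤ X ∧ N ≤ (prices.length : Int) ∧ ∀ p ∈ prices.take N.toNat, 0 ≤ p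
instance (N : Int) (X : Int) (prices : List Int) : Decidable (Pre_solve N X prices) := by
  unfold Pre_solve; infer_instance

def pvWitness_solve : Int × Int × List Int := (3, 7, [2, 3, 5])

def Spec_solve (N : Int) (X : Int) (prices : List Int) (out : Int) : Prop := out = solve_alt N X prices
instance (N : Int) (X : Int) (prices : List Int) (out : Int) : Decidable (Spec_solve N X prices out) := by unfold Spec_solve; infer_instance

-- ===== CLAIM (what is proved, stated in full; the proofs are below) =====
def Claim_equal_solve : Prop := ∀ (N : Int) (X : Int) (prices : List Int), Dom_solve N X prices → Pre_solve N X prices → Spec_solve N X prices (solve N X prices)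

-- ===== LEMMAS AND PROOFS =====

-- 'Ach L c s': from the items of L one can pick a sub-multiset of size c and total s
inductive Ach : List Int → Int → Int → Prop
  | nil : Ach [] 0 0
  | skip (L : List Int) (c s p : Int) : Ach L c s → Ach (L ++ [p]) c s
  | pick (L : List Int) (c s p : Int) : Ach L c s → Ach (L ++ [p]) (c + 1) (s + p)

theorem ach_count_nonneg {L : List Int} {c s : Int} (h : Ach L c s) : 0 ≤ c := by
  induction h with
  | nil => omega
  | skip _ _ _ _ _ ih => omega
  | pick _ _ _ _ _ ih => omega

theorem ach_sum_nonneg {L : List Int} {c s : Int} (hL : ∀ q ∈ L, 0 ≤ q) (h : Ach L c s) : 0 ≤ s := by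
  induction h with
  | nil => omega
  | skip L c s p _ ih => exact ih (fun q hq => hL q (by simp [hq]))
  | pick L c s p _ ih =>
      have h1 := ih (fun q hq => hL q (by simp [hq]))
      have h2 : (0:Int) ≤ p := hL p (by simp)
      omega

theorem ach_nil_iff {c s : Int} : Ach [] c s ↔ c = 0 ∧ s = 0 := by
  constructor
  · intro h
    generalize hE : ([] : List Int) = M at h
    cases h with
    | nil => exact ⟨rfl, rfl⟩
    | skip L' c' s' p' h' => simp at hE
    | pick L' c' s' p' h' => simp at hE
  · rintro ⟨rfl, rfl⟩; exact Ach.nil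

theorem ach_zero (L : List Int) : Ach L 0 0 := by
  induction L using List.reverseRecOn with
  | nil => exact Ach.nil
  | append_singleton L p ih => exact Ach.skip L 0 0 p ih

theorem ach_snoc_iff {L : List Int} {p c s : Int} :
    Ach (L ++ [p]) c s ↔ Ach L c s ∨ Ach L (c - 1) (s - p) := by
  constructor
  · intro h
    generalize hE : L ++ [p] = M at h
    cases h with
    | nil => simp at hE
    | skip L' c' s' p' h' =>
        obtain ⟨h1, h2⟩ := List.append_inj' hE.symm rfl
        simp at h2
        subst h1; exact Or.inl h'
    | pick L' c' s' p' h' =>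
        obtain ⟨h1, h2⟩ := List.append_inj' hE.symm rfl
        simp at h2
        subst h1; subst h2
        right; simpa using h'
  · rintro (h | h)
    · exact Ach.skip L c s p h
    · have := Ach.pick L (c - 1) (s - p) p h
      simpa using this

-- ---------- A side: closed form of the inner loop ----------

-- list-level reference transcription of A's loop body / inner loop (used only in proofs)
def bodyAR (p : Int) (dp : List Int) (j : Int) : List Int :=
  if PySem.List.pyGetD dp (j - p) (-1) ≠ -1 then
    PySem.List.pySetD dp j (max (PySem.List.pyGetD dp j (-1)) (PySem.List.pyGetD dp (j - p) (-1) + 1))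
  else dp

def stepAR (X : Int) (dp : List Int) (p : Int) : List Int :=
  (PySem.List.pyRange X (p - 1) (-1)).foldl (bodyAR p) dp


def hA (b a : Int) : Int := if a ≠ -1 then max b (a + 1) else b

def TA (p : Int) (dp : List Int) : List Int :=
  dp.take p.toNat ++ List.zipWith hA (dp.drop p.toNat) dp

theorem length_TA (p : Int) (dp : List Int) : (TA p dp).length = dp.length := by
  simp [TA]; omega

theorem TA_get_lt {p : Int} {dp : List Int} {j : Nat} (hj : j < p.toNat) :
    (TA p dp)[j]? = dp[j]? := by
  by_cases h2 : j < dp.length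
  · rw [TA, List.getElem?_append_left (by simp; omega)]
    exact List.getElem?_take_of_lt hj
  · rw [List.getElem?_eq_none (by rw [length_TA]; omega), List.getElem?_eq_none (by omega)]

theorem TA_get_ge {p : Int} {dp : List Int} {j : Nat} (hj : p.toNat ≤ j) (hj2 : j < dp.length) :
    (TA p dp)[j]? = some (hA dp[j] (dp[j - p.toNat]'(by omega))) := by
  rw [TA, List.getElem?_append_right (by simp; omega)]
  have hlt : j - (dp.take p.toNat).length < (List.zipWith hA (dp.drop p.toNat) dp).length := by
    simp; omega
  rw [List.getElem?_eq_getElem hlt]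
  simp only [List.getElem_zipWith, List.getElem_drop, List.length_take]
  simp only [show j - min p.toNat dp.length = j - p.toNat by omega]
  simp only [show p.toNat + (j - p.toNat) = j by omega]

theorem TA_take {p : Int} (dp : List Int) : (TA p dp).take p.toNat = dp.take p.toNat := by
  by_cases hc : p.toNat ≤ dp.length
  · have h1 : (dp.take p.toNat).length = p.toNat := by simp; omega
    rw [TA, List.take_append, h1, Nat.sub_self]
    simp [List.take_take]
  · have h1 : dp.drop p.toNat = [] := by
      apply List.drop_eq_nil_of_le; omega
    rw [TA, h1]
    simp only [List.zipWith_nil_left, List.append_nil]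
    rw [List.take_of_length_le (by simp only [List.length_take]; omega)]

theorem bodyA_SA {X p : Int} {dp : List Int} (hlen : dp.length = (X + 1).toNat)
    (hp : 0 ≤ p) {t : Int} (ht1 : p ≤ t) (ht2 : t ≤ X) :
    bodyAR p (dp.take (t + 1).toNat ++ (TA p dp).drop (t + 1).toNat) t
      = dp.take t.toNat ++ (TA p dp).drop t.toNat := by
  have ht0 : 0 ≤ t := le_trans hp ht1
  have htlen : t.toNat < dp.length := by omega
  rw [show (t + 1).toNat = t.toNat + 1 by omega]
  have htake : (dp.take (t.toNat + 1)).length = t.toNat + 1 := by simp; omega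
  -- the two reads hit the untouched prefix
  have hread : ∀ (i : Int) (hi0 : 0 ≤ i) (hit : i ≤ t),
      PySem.List.pyGetD (dp.take (t.toNat + 1) ++ (TA p dp).drop (t.toNat + 1)) i (-1)
        = dp[i.toNat]'(by omega) := by
    intro i hi0 hit
    rw [PySem.List.pyGetD_of_nonneg _ _ hi0, List.getD_eq_getElem?_getD]
    rw [List.getElem?_append_left (by rw [htake]; omega)]
    rw [List.getElem?_take_of_lt (by omega), List.getElem?_eq_getElem (by omega)]
    rfl
  have hsplit : dp.take (t.toNat + 1) = dp.take t.toNat ++ [dp[t.toNat]'htlen] := by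
    rw [List.take_add_one, List.getElem?_eq_getElem htlen]
    rfl
  have hdrop : (TA p dp).drop t.toNat
      = hA (dp[t.toNat]'htlen) (dp[t.toNat - p.toNat]'(by omega)) :: (TA p dp).drop (t.toNat + 1) := by
    rw [List.drop_eq_getElem_cons (by rw [length_TA]; omega)]
    congr 1
    have := TA_get_ge (p := p) (dp := dp) (j := t.toNat) (by omega) htlen
    rw [List.getElem?_eq_getElem (by rw [length_TA]; omega)] at this
    exact Option.some_injective _ this
  have hTP : (t - p).toNat = t.toNat - p.toNat := by omega
  rw [bodyAR, hread (t - p) (by omega) (by omega), hread t ht0 le_rfl]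
  simp only [hTP]
  by_cases hne : dp[t.toNat - p.toNat]'(by omega) = -1
  · rw [if_neg (by simpa using hne)]
    rw [hdrop, hA, if_neg (by simpa using hne), hsplit, List.append_assoc]
    rfl
  · rw [if_pos (by simpa using hne)]
    rw [PySem.List.pySetD_of_nonneg _ _ ht0]
    rw [hsplit, hdrop, hA, if_pos (by simpa using hne)]
    rw [List.append_assoc]
    rw [List.set_append_right _ _ (by simp only [List.length_take]; omega)]
    have hl : (dp.take t.toNat).length = t.toNat := by simp; omega
    simp [hl]

theorem loopA {X p : Int} {dp : List Int} (hlen : dp.length = (X + 1).toNat)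
    (hp : 0 ≤ p) : ∀ (d : Nat) (t : Int), t = p - 1 + d → t ≤ X →
    (PySem.List.pyRange t (p - 1) (-1)).foldl (bodyAR p)
      (dp.take (t + 1).toNat ++ (TA p dp).drop (t + 1).toNat) = TA p dp := by
  intro d
  induction d with
  | zero =>
      intro t ht htX
      rw [PySem.List.pyRange_neg_one_eq_nil (by omega)]
      have h1 : (t + 1).toNat = p.toNat := by omega
      rw [List.foldl_nil, h1, ← TA_take dp, List.take_append_drop]
  | succ d ih =>
      intro t ht htX
      rw [PySem.List.pyRange_neg_one_cons (by omega), List.foldl_cons]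
      rw [bodyA_SA (dp := dp) (t := t) hlen hp (by omega) htX]
      have h1 : dp.take t.toNat = dp.take ((t - 1) + 1).toNat := by congr 1; omega
      have h2 : (TA p dp).drop t.toNat = (TA p dp).drop ((t - 1) + 1).toNat := by congr 1; omega
      rw [h1, h2]
      exact ih (t - 1) (by omega) (by omega)

theorem stepA_eq_TA {X p : Int} {dp : List Int} (hlen : dp.length = (X + 1).toNat)
    (hp : 0 ≤ p) (hX : 0 ≤ X) : stepAR X dp p = TA p dp := by
  by_cases hc : p ≤ X
  · have hstate : dp = dp.take (X + 1).toNat ++ (TA p dp).drop (X + 1).toNat := by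
      rw [List.take_of_length_le (by omega), List.drop_eq_nil_of_le (by rw [length_TA]; omega)]
      simp
    rw [stepAR]
    conv_lhs => rw [hstate]
    exact loopA (X := X) (p := p) (dp := dp) hlen hp (X - p + 1).toNat X (by omega) le_rfl
  · rw [stepAR, PySem.List.pyRange_neg_one_eq_nil (by omega), List.foldl_nil]
    have h1 : dp.drop p.toNat = [] := List.drop_eq_nil_of_le (by omega)
    have h2 : dp.take p.toNat = dp := List.take_of_length_le (by omega)
    rw [TA, h1, h2]
    simp

-- ---------- bridge: the Array port computes the list reference version ----------

theorem arr_getD (a : Array Int) (n : Nat) (d : Int) : a.getD n d = a.toList.getD n d := by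
  rw [Array.getD_eq_getD_getElem?, List.getD_eq_getElem?_getD, Array.getElem?_toList]

theorem bodyA_toList {p j : Int} (dp : Array Int) (hj : 0 ≤ j) (hjp : 0 ≤ j - p) :
    (bodyA p dp j).toList = bodyAR p dp.toList j := by
  rw [bodyA, bodyAR]
  simp only [arr_getD]
  rw [PySem.List.pyGetD_of_nonneg _ _ hjp, PySem.List.pyGetD_of_nonneg _ _ hj,
    PySem.List.pySetD_of_nonneg _ _ hj]
  split_ifs
  · rw [Array.toList_setIfInBounds]
  · rfl

theorem stepA_toList {X p : Int} (dp : Array Int) (hp : 0 ≤ p) :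
    (stepA X dp p).toList = stepAR X dp.toList p := by
  rw [stepA, stepAR, show max (p - 1) (-1) = p - 1 by omega]
  have hgen : ∀ l : List Int, (∀ j ∈ l, 0 ≤ j ∧ 0 ≤ j - p) → ∀ a : Array Int,
      (l.foldl (bodyA p) a).toList = l.foldl (bodyAR p) a.toList := by
    intro l hl
    induction l with
    | nil => intro a; rfl
    | cons x t ih =>
        intro a
        rw [List.foldl_cons, List.foldl_cons,
          ih (fun j hj => hl j (by simp [hj])),
          bodyA_toList a (hl x (by simp)).1 (hl x (by simp)).2]
  apply hgen
  intro j hj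
  rw [PySem.List.mem_pyRange_neg_one] at hj
  omega

-- ---------- A side: the dp array computes max count per exact total ----------

def dpOK (L : List Int) (X : Int) (dp : List Int) : Prop :=
  dp.length = (X + 1).toNat ∧ ∀ j : Int, 0 ≤ j → j ≤ X →
    ((PySem.List.pyGetD dp j (-1) = -1 ∧ ∀ c, ¬ Ach L c j) ∨
     (Ach L (PySem.List.pyGetD dp j (-1)) j ∧ ∀ c, Ach L c j → c ≤ PySem.List.pyGetD dp j (-1)))

theorem dpOK_init (X : Int) (hX : 0 ≤ X) :
    dpOK [] X ((List.replicate (X + 1).toNat (-1 : Int)).set 0 0) := by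
  constructor
  · simp
  · intro j hj0 hjX
    have hjlen : j.toNat < (X + 1).toNat := by omega
    have hval : PySem.List.pyGetD ((List.replicate (X + 1).toNat (-1 : Int)).set 0 0) j (-1)
        = if j = 0 then 0 else -1 := by
      rw [PySem.List.pyGetD_of_nonneg _ _ hj0, List.getD_eq_getElem?_getD]
      rw [List.getElem?_set]
      by_cases hj : j = 0
      · simp [hj, hX]
      · rw [if_neg (by omega)]
        rw [List.getElem?_replicate_of_lt hjlen]
        simp [hj]
    rw [hval]
    by_cases hj : j = 0
    · right
      rw [if_pos hj, hj]
      refine ⟨Ach.nil, ?_⟩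
      intro c hc
      have := ach_nil_iff.mp hc
      omega
    · left
      rw [if_neg hj]
      refine ⟨rfl, ?_⟩
      intro c hc
      have := ach_nil_iff.mp hc
      omega

theorem dpOK_step {L : List Int} {X p : Int} {dp : List Int} (h : dpOK L X dp)
    (hX : 0 ≤ X) (hp : 0 ≤ p) (hL : ∀ q ∈ L, 0 ≤ q) : dpOK (L ++ [p]) X (stepAR X dp p) := by
  obtain ⟨hlen, hinv⟩ := h
  rw [stepA_eq_TA hlen hp hX]
  refine ⟨by rw [length_TA, hlen], ?_⟩
  intro j hj0 hjX
  have hjlen : j.toNat < dp.length := by omega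
  have e1 : PySem.List.pyGetD dp j (-1) = dp[j.toNat]'hjlen := by
    rw [PySem.List.pyGetD_of_nonneg _ _ hj0, List.getD_eq_getElem?_getD,
      List.getElem?_eq_getElem hjlen]
    rfl
  by_cases hcase : j < p
  · -- untouched entry: the new item cannot occur in any selection totalling j
    have hv : PySem.List.pyGetD (TA p dp) j (-1) = PySem.List.pyGetD dp j (-1) := by
      rw [PySem.List.pyGetD_of_nonneg _ _ hj0, PySem.List.pyGetD_of_nonneg _ _ hj0,
        List.getD_eq_getElem?_getD, List.getD_eq_getElem?_getD, TA_get_lt (by omega)]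
    rw [hv]
    have hnew : ∀ c, Ach (L ++ [p]) c j → Ach L c j := by
      intro c hc
      rcases ach_snoc_iff.mp hc with h' | h'
      · exact h'
      · have := ach_sum_nonneg hL h'
        omega
    rcases hinv j hj0 hjX with ⟨hneg, hno⟩ | ⟨hach, hmax⟩
    · exact Or.inl ⟨hneg, fun c hc => hno c (hnew c hc)⟩
    · exact Or.inr ⟨ach_snoc_iff.mpr (Or.inl hach), fun c hc => hmax c (hnew c hc)⟩
  · -- p ≤ j: dp'[j] = hA dp[j] dp[j-p]
    have hjp0 : (0:Int) ≤ j - p := by omega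
    have hjplen : j.toNat - p.toNat < dp.length := by omega
    have e2 : PySem.List.pyGetD dp (j - p) (-1) = dp[j.toNat - p.toNat]'hjplen := by
      rw [PySem.List.pyGetD_of_nonneg _ _ hjp0, List.getD_eq_getElem?_getD]
      simp only [show (j - p).toNat = j.toNat - p.toNat by omega]
      rw [List.getElem?_eq_getElem hjplen]
      rfl
    have hv : PySem.List.pyGetD (TA p dp) j (-1)
        = hA (dp[j.toNat]'hjlen) (dp[j.toNat - p.toNat]'hjplen) := by
      rw [PySem.List.pyGetD_of_nonneg _ _ hj0, List.getD_eq_getElem?_getD,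
        TA_get_ge (by omega) hjlen]
      rfl
    rw [hv]
    rcases hinv (j - p) hjp0 (by omega) with ⟨hneg, hno⟩ | ⟨hach, hmax⟩
    · -- nothing totals j - p: entry keeps its old meaning
      rw [e2] at hneg
      rw [hA, if_neg (by simpa using hneg)]
      have hnew : ∀ c, Ach (L ++ [p]) c j → Ach L c j := by
        intro c hc
        rcases ach_snoc_iff.mp hc with h' | h'
        · exact h'
        · exact absurd h' (hno (c - 1))
      rw [← e1]
      rcases hinv j hj0 hjX with ⟨hneg1, hno1⟩ | ⟨hach1, hmax1⟩
      · exact Or.inl ⟨hneg1, fun c hc => hno1 c (hnew c hc)⟩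
      · exact Or.inr ⟨ach_snoc_iff.mpr (Or.inl hach1), fun c hc => hmax1 c (hnew c hc)⟩
    · -- attainable at j - p with max count v2
      rw [e2] at hach hmax
      have hv2 : 0 ≤ dp[j.toNat - p.toNat]'hjplen := ach_count_nonneg hach
      rw [hA, if_pos (by omega)]
      have hpick : Ach (L ++ [p]) (dp[j.toNat - p.toNat]'hjplen + 1) j := by
        have := Ach.pick L _ _ p hach
        simpa using this
      have hboundpick : ∀ c, Ach L (c - 1) (j - p) → c ≤ dp[j.toNat - p.toNat]'hjplen + 1 := by
        intro c hc
        have := hmax (c - 1) hc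
        omega
      rcases hinv j hj0 hjX with ⟨hneg1, hno1⟩ | ⟨hach1, hmax1⟩
      · rw [e1] at hneg1
        rw [hneg1]
        rw [max_eq_right (by omega)]
        right
        refine ⟨hpick, ?_⟩
        intro c hc
        rcases ach_snoc_iff.mp hc with h' | h'
        · exact absurd h' (hno1 c)
        · exact hboundpick c h'
      · rw [e1] at hach1 hmax1
        right
        rcases le_total (dp[j.toNat - p.toNat]'hjplen + 1) (dp[j.toNat]'hjlen) with hle | hle
        · rw [max_eq_left hle]
          refine ⟨ach_snoc_iff.mpr (Or.inl hach1), ?_⟩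
          intro c hc
          rcases ach_snoc_iff.mp hc with h' | h'
          · exact hmax1 c h'
          · have := hboundpick c h'
            omega
        · rw [max_eq_right hle]
          refine ⟨hpick, ?_⟩
          intro c hc
          rcases ach_snoc_iff.mp hc with h' | h'
          · have := hmax1 c h'
            omega
          · exact hboundpick c h'

-- ---------- B side: reach is exactly the achievable pairs with total ≤ X ----------

def reachOK (L : List Int) (X : Int) (r : List (Int × Int)) : Prop :=
  ∀ c s : Int, (c, s) ∈ r ↔ (Ach L c s ∧ s ≤ X)

theorem reachOK_init (X : Int) (hX : 0 ≤ X) :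
    reachOK [] X (PySem.Set.ofList [((0 : Int), (0 : Int))]) := by
  intro c s
  constructor
  · intro h
    have : (c, s) = ((0 : Int), (0 : Int)) := by
      simpa using (PySem.Set.mem_ofList [((0 : Int), (0 : Int))] (c, s)).mp h
    simp at this
    refine ⟨?_, by omega⟩
    rw [this.1, this.2]; exact Ach.nil
  · rintro ⟨h, _⟩
    have := ach_nil_iff.mp h
    rw [(PySem.Set.mem_ofList [((0 : Int), (0 : Int))] (c, s))]
    simp [this.1, this.2]

theorem reachOK_step {L : List Int} {X p : Int} {r : List (Int × Int)} (h : reachOK L X r)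
    (hp : 0 ≤ p) : reachOK (L ++ [p]) X (stepB X r p) := by
  intro c s
  rw [stepB, PySem.Set.mem_union]
  constructor
  · rintro (hm | hm)
    · obtain ⟨ha, hs⟩ := (h c s).mp hm
      exact ⟨ach_snoc_iff.mpr (Or.inl ha), hs⟩
    · simp only [List.mem_map, List.mem_filter] at hm
      obtain ⟨⟨c', s'⟩, ⟨hq, hle⟩, heq⟩ := hm
      simp at hle heq
      obtain ⟨ha, _⟩ := (h c' s').mp hq
      refine ⟨ach_snoc_iff.mpr (Or.inr ?_), by omega⟩
      have : c - 1 = c' ∧ s - p = s' := by omega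
      rw [this.1, this.2]; exact ha
  · rintro ⟨ha, hs⟩
    rcases ach_snoc_iff.mp ha with hL' | hL'
    · exact Or.inl ((h c s).mpr ⟨hL', hs⟩)
    · right
      simp only [List.mem_map, List.mem_filter]
      refine ⟨(c - 1, s - p), ⟨(h (c - 1) (s - p)).mpr ⟨hL', by omega⟩, by simp; omega⟩, by simp⟩

theorem reachOK_fold (L : List Int) (X : Int) (hX : 0 ≤ X) (hL : ∀ q ∈ L, 0 ≤ q) :
    reachOK L X (L.foldl (stepB X) (PySem.Set.ofList [((0 : Int), (0 : Int))])) := by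
  induction L using List.reverseRecOn with
  | nil => exact reachOK_init X hX
  | append_singleton L p ih =>
      rw [List.foldl_append]
      exact reachOK_step (ih (fun q hq => hL q (by simp [hq]))) (hL p (by simp))

theorem dpOK_fold (L : List Int) (X : Int) (hX : 0 ≤ X) (hL : ∀ q ∈ L, 0 ≤ q) :
    dpOK L X (L.foldl (stepAR X) ((List.replicate (X + 1).toNat (-1 : Int)).set 0 0)) := by
  induction L using List.reverseRecOn with
  | nil => exact dpOK_init X hX
  | append_singleton L p ih =>
      rw [List.foldl_append]
      exact dpOK_step (ih (fun q hq => hL q (by simp [hq]))) hX (hL p (by simp))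
        (fun q hq => hL q (by simp [hq]))

-- ---------- generic loop-shape facts for A's final scan ----------

theorem foldl_keep_some (P : Int → Prop) [DecidablePred P] (l : List Int) (v : Int) :
    l.foldl (fun acc j =>
      match acc with
      | some v => some v
      | none => if P j then some j else none) (some v) = some v := by
  induction l with
  | nil => rfl
  | cons x l ih => simpa using ih

theorem foldl_first_eq_find? (P : Int → Prop) [DecidablePred P] (l : List Int) :
    l.foldl (fun acc j =>
      match acc with
      | some v => some v
      | none => if P j then some j else none) (none : Option Int)
      = l.find? (fun j => decide (P j)) := by
  induction l with
  | nil => rfl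
  | cons x l ih =>
      rw [List.foldl_cons, List.find?_cons]
      by_cases hx : P x
      · simp only [hx, if_pos, decide_true]
        exact foldl_keep_some P l x
      · simpa [hx] using ih

theorem find?_pyRange_desc (P : Int → Prop) [DecidablePred P] {b x : Int}
    (hbx : b < x) (hx : P x) :
    ∀ (d : Nat) (a : Int), a = x + d → (∀ y, x < y → y ≤ a → ¬ P y) →
    (PySem.List.pyRange a b (-1)).find? (fun j => decide (P j)) = some x := by
  intro d
  induction d with
  | zero =>
      intro a ha habove
      have hax : a = x := by omega
      subst hax
      rw [PySem.List.pyRange_neg_one_cons (by omega), List.find?_cons]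
      simp [hx]
  | succ d ih =>
      intro a ha habove
      rw [PySem.List.pyRange_neg_one_cons (by omega), List.find?_cons]
      have hPa : ¬ P a := habove a (by omega) le_rfl
      simp only [hPa, decide_false]
      exact ih (a - 1) (by omega) (fun y h1 h2 => habove y h1 (by omega))

-- A's outer index loop is the fold of stepAR over the first N prices
theorem outerA_eq (N X : Int) (prices : List Int) (hN : N ≤ (prices.length : Int))
    (dp0 : List Int) :
    (PySem.List.pyRange 0 N 1).foldl (fun dp i => stepAR X dp (PySem.List.pyGetD prices i 0)) dp0
      = (prices.take N.toNat).foldl (stepAR X) dp0 := by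
  by_cases h0 : N ≤ 0
  · rw [PySem.List.pyRange_one_eq_nil (by omega), show N.toNat = 0 by omega]
    rfl
  · have hlenL : ((prices.take N.toNat).length : Int) = N := by simp; omega
    have hcong : (PySem.List.pyRange 0 N 1).foldl
          (fun dp i => stepAR X dp (PySem.List.pyGetD prices i 0)) dp0
        = (PySem.List.pyRange 0 N 1).foldl
          (fun dp i => stepAR X dp (PySem.List.pyGetD (prices.take N.toNat) i 0)) dp0 := by
      apply PySem.List.foldl_congr_mem
      intro acc x hx
      rw [PySem.List.mem_pyRange_one] at hx
      congr 1
      rw [PySem.List.pyGetD_of_nonneg _ _ hx.1, PySem.List.pyGetD_of_nonneg _ _ hx.1,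
        List.getD_eq_getElem?_getD, List.getD_eq_getElem?_getD,
        List.getElem?_take_of_lt (by omega)]
    have hrange : PySem.List.pyRange 0 N 1
        = PySem.List.pyRange 0 ((prices.take N.toNat).length : Int) 1 := by rw [hlenL]
    rw [hcong, hrange]
    exact PySem.List.foldl_pyRange_zero_pyGetD' (prices.take N.toNat) 0 (stepAR X) dp0

-- B's 'prices[:N] if N > 0 else []' is the same list of the first N prices
theorem itemsB_eq (N : Int) (prices : List Int) :
    (if 0 < N then PySem.List.slice prices (some 0) (some N) else []) = prices.take N.toNat := by
  by_cases h0 : 0 < N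
  · rw [if_pos h0]
    rw [PySem.List.slice_zero_start, PySem.List.slice_to _ (by omega)]
  · rw [if_neg h0, show N.toNat = 0 by omega]
    rfl

-- ===== VERDICT helper: the main equivalence =====
theorem solve_spec_main (N X : Int) (prices : List Int) (hpre : Pre_solve N X prices) :
    solve N X prices = solve_alt N X prices := by
  obtain ⟨hX, hN, hP⟩ := hpre
  have hdp := dpOK_fold (prices.take N.toNat) X hX hP
  have hre := reachOK_fold (prices.take N.toNat) X hX hP
  rw [solve, solve_alt, min_eq_left hN, itemsB_eq N prices]
  -- bridge the Array fold to the list-level reference fold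
  have harr : ((PySem.List.pyRange 0 N 1).foldl
        (fun dp i => stepA X dp (PySem.List.pyGetD prices i 0))
        ((Array.replicate (X + 1).toNat (-1)).setIfInBounds 0 0)).toList
      = (prices.take N.toNat).foldl (stepAR X)
        ((List.replicate (X + 1).toNat (-1 : Int)).set 0 0) := by
    have h1 : ∀ l : List Int, (∀ i ∈ l, 0 ≤ PySem.List.pyGetD prices i 0) →
        ∀ a : Array Int,
        (l.foldl (fun dp i => stepA X dp (PySem.List.pyGetD prices i 0)) a).toList
          = l.foldl (fun dp i => stepAR X dp (PySem.List.pyGetD prices i 0)) a.toList := by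
      intro l hl
      induction l with
      | nil => intro a; rfl
      | cons x t ih =>
          intro a
          rw [List.foldl_cons, List.foldl_cons,
            ih (fun i hi => hl i (by simp [hi])) (stepA X a (PySem.List.pyGetD prices x 0)),
            stepA_toList a (hl x (by simp))]
    rw [h1 _ ?_ _, Array.toList_setIfInBounds, Array.toList_replicate,
      outerA_eq N X prices hN]
    intro i hi
    rw [PySem.List.mem_pyRange_one] at hi
    have hilen : i.toNat < prices.length := by omega
    rw [PySem.List.pyGetD_of_nonneg _ _ hi.1, List.getD_eq_getElem?_getD,
      List.getElem?_eq_getElem hilen]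
    simp only [Option.getD_some]
    apply hP
    have hlt : i.toNat < (prices.take N.toNat).length := by simp; omega
    have he : (prices.take N.toNat)[i.toNat]'hlt = prices[i.toNat]'hilen := by
      simp [List.getElem_take]
    exact he ▸ List.getElem_mem hlt
  set L := prices.take N.toNat with hLdef
  set dpA := (PySem.List.pyRange 0 N 1).foldl
      (fun dp i => stepA X dp (PySem.List.pyGetD prices i 0))
      ((Array.replicate (X + 1).toNat (-1)).setIfInBounds 0 0) with hdpAdef
  set dpL := L.foldl (stepAR X) ((List.replicate (X + 1).toNat (-1 : Int)).set 0 0)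
    with hdpLdef
  set r := L.foldl (stepB X) (PySem.Set.ofList [((0 : Int), (0 : Int))]) with hrdef
  rw [harr]
  obtain ⟨hlen0, hinv0⟩ := hdp
  have hlen : dpL.length = (X + 1).toNat := hlen0
  have hinv : ∀ j : Int, 0 ≤ j → j ≤ X →
      ((PySem.List.pyGetD dpL j (-1) = -1 ∧ ∀ c, ¬ Ach L c j) ∨
       (Ach L (PySem.List.pyGetD dpL j (-1)) j ∧
        ∀ c, Ach L c j → c ≤ PySem.List.pyGetD dpL j (-1))) := hinv0
  clear hlen0 hinv0
  have hreL : reachOK L X r := hre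
  clear hre
  have hre := hreL
  clear hreL
  have hget : ∀ j : Int, 0 ≤ j → dpA.getD j.toNat (-1) = PySem.List.pyGetD dpL j (-1) := by
    intro j hj
    rw [arr_getD, harr, ← PySem.List.pyGetD_of_nonneg _ _ hj]
  -- B-side: the maximum count k and the best total smax among count-k pairs
  have h00 : ((0 : Int), (0 : Int)) ∈ r := (hre 0 0).mpr ⟨ach_zero L, hX⟩
  obtain ⟨k, hk⟩ : ∃ k, PySem.List.max? (r.map (fun q => q.1)) (fun y => y) = some k := by
    cases hmk : PySem.List.max? (r.map (fun q => q.1)) (fun y => y) with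
    | none =>
        rw [PySem.List.max?_eq_none_iff, List.map_eq_nil_iff] at hmk
        rw [hmk] at h00
        cases h00
    | some k => exact ⟨k, rfl⟩
  have hkmax : ∀ c s : Int, (c, s) ∈ r → c ≤ k := by
    intro c s hm
    exact PySem.List.max?_isMax hk c (List.mem_map.mpr ⟨(c, s), hm, rfl⟩)
  obtain ⟨⟨c0, s0⟩, hq, hqk0⟩ := List.mem_map.mp (PySem.List.max?_mem hk)
  have hqk : c0 = k := hqk0
  have hkach : Ach L k s0 ∧ s0 ≤ X := by
    have := (hre c0 s0).mp hq
    rw [hqk] at this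
    exact this
  have hk0 : (0 : Int) ≤ k := ach_count_nonneg hkach.1
  obtain ⟨smax, hs⟩ : ∃ s,
      PySem.List.max? ((r.filter (fun q => decide (q.1 = k))).map (fun q => q.2)) (fun y => y)
        = some s := by
    cases hms : PySem.List.max? ((r.filter (fun q => decide (q.1 = k))).map (fun q => q.2))
        (fun y => y) with
    | none =>
        rw [PySem.List.max?_eq_none_iff, List.map_eq_nil_iff, List.filter_eq_nil_iff] at hms
        exact absurd (by simpa using hqk) (hms (c0, s0) hq)
    | some s => exact ⟨s, rfl⟩
  obtain ⟨⟨c1, s1⟩, hq1, hq1s0⟩ := List.mem_map.mp (PySem.List.max?_mem hs)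
  have hq1s : s1 = smax := hq1s0
  have hq1' := List.mem_filter.mp hq1
  have hc1k : c1 = k := by simpa using hq1'.2
  have hsach : Ach L k smax ∧ smax ≤ X := by
    have := (hre c1 s1).mp hq1'.1
    rw [hc1k, hq1s] at this
    exact this
  have hs0 : (0 : Int) ≤ smax := ach_sum_nonneg hP hsach.1
  have hsmax : ∀ s : Int, (k, s) ∈ r → s ≤ smax := by
    intro s hm
    exact PySem.List.max?_isMax hs s
      (List.mem_map.mpr ⟨(k, s), List.mem_filter.mpr ⟨hm, by simp⟩, rfl⟩)
  -- A-side: dp[smax] = k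
  have hdpS : PySem.List.pyGetD dpL smax (-1) = k := by
    rcases hinv smax hs0 hsach.2 with ⟨hneg, hno⟩ | ⟨hach, hmax⟩
    · exact absurd hsach.1 (hno k)
    · have h1 : k ≤ PySem.List.pyGetD dpL smax (-1) := hmax k hsach.1
      have h2 : PySem.List.pyGetD dpL smax (-1) ≤ k :=
        hkmax _ smax ((hre _ smax).mpr ⟨hach, hsach.2⟩)
      omega
  -- max(dp) = k
  have hkmem : k ∈ dpL := by
    have hsl : smax.toNat < dpL.length := by omega
    have : PySem.List.pyGetD dpL smax (-1) = dpL[smax.toNat]'hsl := by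
      rw [PySem.List.pyGetD_of_nonneg _ _ hs0, List.getD_eq_getElem?_getD,
        List.getElem?_eq_getElem hsl]
      rfl
    rw [this] at hdpS
    exact hdpS ▸ List.getElem_mem hsl
  obtain ⟨v, hv⟩ : ∃ v, PySem.List.max? dpL (fun y => y) = some v := by
    cases hmv : PySem.List.max? dpL (fun y => y) with
    | none =>
        rw [PySem.List.max?_eq_none_iff] at hmv
        rw [hmv] at hlen
        simp at hlen
        omega
    | some v => exact ⟨v, rfl⟩
  have hvk : v = k := by
    have hkv : k ≤ v := PySem.List.max?_isMax hv k hkmem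
    obtain ⟨jn, hjn, hje⟩ := List.mem_iff_getElem.mp (PySem.List.max?_mem hv)
    have hje' : PySem.List.pyGetD dpL (jn : Int) (-1) = v := by
      rw [PySem.List.pyGetD_natCast, List.getD_eq_getElem?_getD, List.getElem?_eq_getElem hjn,
        hje]
      rfl
    have hjX : (jn : Int) ≤ X := by omega
    rcases hinv (jn : Int) (by omega) hjX with ⟨hneg, hno⟩ | ⟨hach, hmax⟩
    · rw [hje'] at hneg
      omega
    · rw [hje'] at hach
      have : v ≤ k := hkmax v (jn : Int) ((hre v (jn : Int)).mpr ⟨hach, hjX⟩)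
      omega
  -- the final scan of A finds exactly smax
  have hkD : (PySem.List.max? (r.map (fun q => q.1)) (fun y => y)).getD 0 = k := by rw [hk]; rfl
  have hvD : (PySem.List.max? dpL (fun y => y)).getD 0 = k := by rw [hv, hvk]; rfl
  rw [hkD, hvD, hs]
  simp only [Option.getD_some]
  rw [foldl_first_eq_find? (fun j => dpA.getD j.toNat (-1) = k)]
  rw [find?_pyRange_desc (fun j => dpA.getD j.toNat (-1) = k) (b := -1) (x := smax)
    (by omega)
    (by show dpA.getD smax.toNat (-1) = k; rw [hget smax hs0]; exact hdpS)
    (X - smax).toNat X (by omega) ?_]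
  · simp
  · intro y h1 h2 heq
    rw [hget y (by omega)] at heq
    rcases hinv y (by omega) h2 with ⟨hneg, hno⟩ | ⟨hach, hmax⟩
    · omega
    · rw [heq] at hach
      have := hsmax y ((hre k y).mpr ⟨hach, h2⟩)
      omega

-- ===== VERDICT (by name: the statement is the Claim_ definition above) =====
theorem solve_spec : Claim_equal_solve := by
  intro N X prices _ hpre
  exact solve_spec_main N X prices hpre
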